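-- pv_equiv track=rewrite | github.com/MuhammadWaleed009/ProtocolFoundry | cbt_backend/app/graphs/state.py | _merge_scratchpad
-- ===== SOURCE A (Python) =====
-- from typing import Any, Literal, TypedDict, Annotated
--
-- def _merge_scratchpad(a: Any, b: Any) -> dict:
--     """
--     scratchpad is a dict of lists[str]. We want to append per-key safely.
--     Node returns only delta like {"safety": ["..."]}.
--     """
--     out: dict = dict(a) if isinstance(a, dict) else {}
--     delta: dict = b if isinstance(b, dict) else {}
--     for k, v in delta.items():
--         prev = out.get(k)
--         prev_list = prev if isinstance(prev, list) else []
--         if isinstance(v, list):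
--             # avoid duplicate adjacent entries to keep UI tidy
--             merged = list(prev_list)
--             for item in v:
--                 if merged and merged[-1] == item:
--                     continue
--                 merged.append(item)
--             out[k] = merged
--         else:
--             if not (prev_list and prev_list[-1] == v):
--                 out[k] = prev_list + [str(v)]
--             else:
--                 out[k] = prev_list
--     return out
-- ===== SOURCE B (Python) =====
-- _SENTINEL = object()
--
--
-- def _extend(prev_list, v):
--     # stateless pairwise dedup: keep each element of v that differs from its
--     # raw predecessor in prev_list + v (sentinel predecessor for the very first
--     # element when prev_list is empty — it never equals a real entry)
--     preds = [prev_list[-1] if prev_list else _SENTINEL] + v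
--     return prev_list + [x for p, x in zip(preds, v) if x != p]
--
--
-- def _merge_value(prev, v):
--     prev_list = prev if isinstance(prev, list) else []
--     if isinstance(v, list):
--         return _extend(prev_list, v)
--     return prev_list if (prev_list and prev_list[-1] == v) else prev_list + [str(v)]
--
--
-- def _merge_scratchpad(a, b):
--     """
--     scratchpad is a dict of lists[str]. We want to append per-key safely.
--     Node returns only delta like {"safety": ["..."]}.
--     """
--     base = dict(a) if isinstance(a, dict) else {}
--     delta = b if isinstance(b, dict) else {}
--     return {**base, **{k: _merge_value(base.get(k), v) for k, v in delta.items()}}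
-- ===== Notes on version B (the rewrite author's own statement) =====
-- stated objective: alternative
-- what changed: A's in-place mutation loop with a growing accumulator and last-kept-element dedup check is replaced by a staged immutable pipeline: each delta value is filtered statelessly by comparing every element to its raw predecessor (zip with a shifted copy), the per-key results are built in one dict comprehension from the untouched base, and the answer is a single {**base, **delta'} union.
import Mathlib
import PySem

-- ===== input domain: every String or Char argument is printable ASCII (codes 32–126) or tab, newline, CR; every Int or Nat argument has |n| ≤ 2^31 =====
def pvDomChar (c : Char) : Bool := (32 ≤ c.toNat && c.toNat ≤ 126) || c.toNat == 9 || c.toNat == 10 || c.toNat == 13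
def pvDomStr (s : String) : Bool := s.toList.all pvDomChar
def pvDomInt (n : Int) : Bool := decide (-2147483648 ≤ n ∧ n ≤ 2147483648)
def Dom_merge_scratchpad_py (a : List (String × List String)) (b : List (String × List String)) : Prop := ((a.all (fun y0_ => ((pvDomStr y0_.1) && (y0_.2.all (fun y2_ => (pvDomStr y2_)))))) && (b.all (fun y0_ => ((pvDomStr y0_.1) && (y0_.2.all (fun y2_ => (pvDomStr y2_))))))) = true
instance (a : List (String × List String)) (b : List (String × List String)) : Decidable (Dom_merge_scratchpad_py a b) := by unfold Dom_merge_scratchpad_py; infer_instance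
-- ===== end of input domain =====

-- B replaces A's in-place mutation loop (growing accumulator, last-kept dedup check) by a staged
-- immutable pipeline: a stateless predecessor-comparison filter per value, a dict comprehension
-- over the untouched base, and one {**base, **delta'} union; same cost, different decomposition.
-- Inputs are dict[str, list[str]] here, so the non-list/else branch of the Python never fires.

-- ===== PORT A =====
-- inner loop: `for item in v: if merged and merged[-1] == item: continue; merged.append(item)`
def pvMergeLoopA (merged : List String) (v : List String) : List String :=
  v.foldl (fun m item =>
    if m ≠ [] ∧ m.getLast? = some item then m else m ++ [item]) merged

def merge_scratchpad_py (a : List (String × List String)) (b : List (String × List String)) : List (String × List String) :=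
  -- out = dict(a)
  let out0 : PySem.Dict String (List String) :=
    a.foldl (fun d kv => d.insert kv.1 kv.2) PySem.Dict.empty
  -- for k, v in delta.items(): prev_list = out.get(k) or []; out[k] = merged
  (b.foldl (fun out kv =>
    let prev_list := (out.get? kv.1).getD []
    out.insert kv.1 (pvMergeLoopA prev_list kv.2)) out0).items

-- ===== PORT B =====
-- preds = [prev_list[-1] if prev_list else _SENTINEL] + v; keep x iff x != its predecessor.
-- `none` plays the Python sentinel object(), which never equals a string — exact.
def pvExtend (prev_list : List String) (v : List String) : List String :=
  let preds : List (Option String) := prev_list.getLast? :: v.map some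
  prev_list ++ ((preds.zip v).filter (fun p => p.1 != some p.2)).map Prod.snd

-- _merge_value; at this typing v is always a list, so only the list branch is reachable
def pvMergeValue (prev : Option (List String)) (v : List String) : List String :=
  pvExtend (prev.getD []) v

def merge_scratchpad_py_alt (a : List (String × List String)) (b : List (String × List String)) : List (String × List String) :=
  let base : PySem.Dict String (List String) :=
    a.foldl (fun d kv => d.insert kv.1 kv.2) PySem.Dict.empty
  -- {k: _merge_value(base.get(k), v) for k, v in delta.items()}
  let deltaMerged : PySem.Dict String (List String) :=
    b.foldl (fun d kv => d.insert kv.1 (pvMergeValue (base.get? kv.1) kv.2)) PySem.Dict.empty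
  -- {**base, **deltaMerged}
  (deltaMerged.items.foldl (fun d kv => d.insert kv.1 kv.2) base).items

-- ===== PRECONDITION & SPEC =====
-- Pre_ excludes association lists b with duplicate keys: b stands for a Python dict, which
-- cannot carry duplicate keys, so such lists correspond to no Python input at all.
def Pre_merge_scratchpad_py (a : List (String × List String)) (b : List (String × List String)) : Prop :=
  (b.map Prod.fst).Nodup
instance (a : List (String × List String)) (b : List (String × List String)) : Decidable (Pre_merge_scratchpad_py a b) := by unfold Pre_merge_scratchpad_py; infer_instance

def pvWitness_merge_scratchpad_py : (List (String × List String)) × (List (String × List String)) :=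
  ([("k", ["x"])], [("k", ["x", "y", "y"]), ("j", ["a"])])

def Spec_merge_scratchpad_py (a : List (String × List String)) (b : List (String × List String)) (out : List (String × List String)) : Prop := out = merge_scratchpad_py_alt a b
instance (a : List (String × List String)) (b : List (String × List String)) (out : List (String × List String)) : Decidable (Spec_merge_scratchpad_py a b out) := by unfold Spec_merge_scratchpad_py; infer_instance

-- ===== CLAIM (what is proved, stated in full; the proofs are below) =====
def Claim_equal_merge_scratchpad_py : Prop := ∀ (a : List (String × List String)) (b : List (String × List String)), Dom_merge_scratchpad_py a b → Pre_merge_scratchpad_py a b → Spec_merge_scratchpad_py a b (merge_scratchpad_py a b)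

-- ===== LEMMAS AND PROOFS =====

-- B's predecessor-filter, seeded with an explicit predecessor (proof-only helper)
def pvFilt (l : Option String) (v : List String) : List String :=
  (((l :: v.map some).zip v).filter (fun p => p.1 != some p.2)).map Prod.snd

theorem pvExtend_eq (prev v : List String) :
    pvExtend prev v = prev ++ pvFilt prev.getLast? v := rfl

theorem pvFilt_cons (l : Option String) (x : String) (r : List String) :
    pvFilt l (x :: r) = (if l = some x then [] else [x]) ++ pvFilt (some x) r := by
  by_cases h : l = some x <;> simp [pvFilt, List.zip_cons_cons, h]

-- A's last-kept-check loop equals B's stateless predecessor filter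
theorem pvMergeLoopA_eq_filt (v : List String) : ∀ (m : List String),
    pvMergeLoopA m v = m ++ pvFilt m.getLast? v := by
  induction v with
  | nil => intro m; simp [pvMergeLoopA, pvFilt]
  | cons x r ih =>
    intro m
    have step : pvMergeLoopA m (x :: r) =
        pvMergeLoopA (if m ≠ [] ∧ m.getLast? = some x then m else m ++ [x]) r := by
      simp only [pvMergeLoopA, List.foldl_cons]
    by_cases h : m ≠ [] ∧ m.getLast? = some x
    · rw [step, if_pos h, ih m, pvFilt_cons, h.2]
      simp
    · have hne : m.getLast? ≠ some x := by
        rcases List.eq_nil_or_concat m with rfl | ⟨ys, y, rfl⟩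
        · simp
        · simpa using fun hc => (not_and.mp h hc)
      rw [step, if_neg h, ih (m ++ [x]), pvFilt_cons, if_neg hne]
      simp

theorem pvMergeLoopA_eq_mergeValue (prev v : List String) :
    pvMergeLoopA prev v = pvMergeValue (some prev) v := by
  rw [pvMergeValue, Option.getD_some, pvExtend_eq, pvMergeLoopA_eq_filt]

-- A's dict-mutating fold over delta equals inserting the base-derived values one by one,
-- as long as no key of the remaining delta was touched yet (delta keys are distinct)
theorem pvFold_eq (base : PySem.Dict String (List String)) :
    ∀ (l : List (String × List String)) (out : PySem.Dict String (List String)),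
    (l.map Prod.fst).Nodup →
    (∀ kv ∈ l, out.get? kv.1 = base.get? kv.1) →
    l.foldl (fun out kv =>
        let prev_list := (out.get? kv.1).getD []
        out.insert kv.1 (pvMergeLoopA prev_list kv.2)) out =
    (l.map (fun kv => (kv.1, pvMergeValue (base.get? kv.1) kv.2))).foldl
        (fun d kv => d.insert kv.1 kv.2) out := by
  intro l
  induction l with
  | nil => intro out _ _; rfl
  | cons kv rest ih =>
    intro out hnd hagree
    simp only [List.map_cons, List.foldl_cons]
    have hval : pvMergeLoopA ((out.get? kv.1).getD []) kv.2 =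
        pvMergeValue (base.get? kv.1) kv.2 := by
      rw [hagree kv (List.mem_cons_self ..)]
      cases h : base.get? kv.1 with
      | none => rw [pvMergeValue, pvMergeLoopA_eq_filt, pvExtend_eq]
      | some p => simpa using pvMergeLoopA_eq_mergeValue p kv.2
    rw [hval]
    apply ih
    · exact (List.nodup_cons.mp hnd).2
    · intro kv' hkv'
      have hne : kv'.1 ≠ kv.1 := by
        intro he
        exact (List.nodup_cons.mp hnd).1 (he ▸ List.mem_map_of_mem hkv')
      rw [PySem.Dict.get?_insert_of_ne _ _ hne]
      exact hagree kv' (List.mem_cons_of_mem _ hkv')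

-- ===== VERDICT (by name: the statement is the Claim_ definition above) =====
theorem merge_scratchpad_py_spec : Claim_equal_merge_scratchpad_py := by
  intro a b _ hpre
  unfold Spec_merge_scratchpad_py merge_scratchpad_py merge_scratchpad_py_alt
  have hitems :
      ((b.foldl (fun d kv => d.insert kv.1
          (pvMergeValue ((a.foldl (fun d kv => d.insert kv.1 kv.2) PySem.Dict.empty).get? kv.1) kv.2))
        PySem.Dict.empty)).items =
      b.map (fun kv => (kv.1,
          pvMergeValue ((a.foldl (fun d kv => d.insert kv.1 kv.2) PySem.Dict.empty).get? kv.1) kv.2)) := by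
    rw [PySem.Dict.items_foldl_insert_fresh]
    · simp [PySem.Dict.empty]
    · intro kv _; simp
    · exact hpre
  simp only [hitems]
  rw [pvFold_eq _ b _ hpre (fun kv _ => rfl)]
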